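-- pv_equiv track=rewrite | github.com/onjik/coding_test_practice | python/programmers/자물쇠와 열쇠.py | solution
-- ===== SOURCE A (Python) =====
-- def rotate(target, d):
--     n = len(target)
--     tmp = [[0] * n for _ in range(n)]
--
--     if d == 1:
--         for x in range(n):
--             for y in range(n):
--                 tmp[y][x] = target[n - 1 - x][y]
--     elif d == 2:
--         for x in range(n):
--             for y in range(n):
--                 tmp[y][x] = target[n - 1 - y][n - 1 - x]
--     elif d == 3:
--         for x in range(n):
--             for y in range(n):
--                 tmp[y][x] = target[x][n - 1 - y]
--     else:
--         for x in range(n):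
--             for y in range(n):
--                 tmp[y][x] = target[y][x]
--     return tmp
--
-- def check(target):
--     n = len(target) // 3
--     for r in range(n, n * 2):
--         for c in range(n, n * 2):
--             if target[r][c] != 1:
--                 return False
--     return True
--
-- def solution(key, lock):
--     n = len(lock)
--     m = len(key)
--     # 가로 세로 3배 늘어난 배열을 정의한다
--     new_lock = [[0] * (n * 3) for _ in range(n * 3)]
--     for x in range(n):
--         for y in range(n):
--             new_lock[n + y][n + x] = lock[y][x]
--     # 그 다음 1부터, n-1까지 쭉 돌면서 체크한다
--     for x in range(1, n * 2):
--         for y in range(1, n * 2):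
--             # 쭉 돌리면서 대응한다
--             for degree in range(4):
--                 new_key = rotate(key, degree)
--                 # 다 더한다음에
--                 for nx in range(m):
--                     for ny in range(m):
--                         new_lock[y + ny][x + nx] += new_key[ny][nx]
--                 # 체크한다.
--                 if check(new_lock):
--                     return True
--                 # 답이 아니니까 다 빼준다
--                 for nx in range(m):
--                     for ny in range(m):
--                         new_lock[y + ny][x + nx] -= new_key[ny][nx]
--     return False
-- ===== SOURCE B (Python) =====
-- def _rot(p):
--     m = len(p)
--     return [[p[m - 1 - c][r] for c in range(m)] for r in range(m)]
--
-- def solution(key, lock):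
--     n = len(lock)
--     m = len(key)
--     r1 = _rot(key)
--     r2 = _rot(r1)
--     r3 = _rot(r2)
--     rots = [key, r1, r2, r3]
--     for y in range(1, 2 * n):
--         for x in range(1, 2 * n):
--             for k in rots:
--                 if all(
--                     lock[r][c] + (k[n + r - y][n + c - x]
--                                   if y <= n + r < y + m and x <= n + c < x + m
--                                   else 0) == 1
--                     for r in range(n) for c in range(n)
--                 ):
--                     return True
--     return False
-- ===== Notes on version B (the rewrite author's own statement) =====
-- stated objective: faster
-- what changed: B drops A's 3n-wide mutable board and its rotate/add/check/subtract cycle per placement: it precomputes the four key rotations once and, for each slide offset, directly tests (with early exit) that every lock cell plus the overlapping key cell (0 outside the key) equals 1.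
-- outside the precondition, e.g. on solution([[]], []): A returns False, B raises IndexError
import Mathlib
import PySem

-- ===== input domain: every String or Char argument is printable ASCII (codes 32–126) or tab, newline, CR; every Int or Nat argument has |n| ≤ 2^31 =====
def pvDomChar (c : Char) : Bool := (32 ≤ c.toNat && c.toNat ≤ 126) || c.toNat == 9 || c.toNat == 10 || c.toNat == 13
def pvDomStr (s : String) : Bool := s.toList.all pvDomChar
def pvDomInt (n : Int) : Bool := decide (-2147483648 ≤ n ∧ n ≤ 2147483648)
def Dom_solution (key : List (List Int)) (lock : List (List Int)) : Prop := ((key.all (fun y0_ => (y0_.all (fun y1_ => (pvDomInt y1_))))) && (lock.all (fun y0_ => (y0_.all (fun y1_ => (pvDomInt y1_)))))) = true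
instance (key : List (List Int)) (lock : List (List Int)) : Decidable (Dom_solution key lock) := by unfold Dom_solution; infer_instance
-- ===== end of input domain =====

-- B replaces A's mutated 3n×3n working board (add key / check / subtract key per placement) by a
-- pure arithmetic fit-test per placement over the original lock, with the four key rotations
-- precomputed once.  Equivalence is on the return value; neither version mutates its arguments.

-- shared 2-D list primitives (Python g[i][j] read with 0 default, write, in-place update)
def get2 (g : List (List Int)) (i j : Nat) : Int := (g.getD i []).getD j 0
def set2 (g : List (List Int)) (i j : Nat) (v : Int) : List (List Int) :=
  g.modify i (fun row => row.set j v)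
def modify2 (g : List (List Int)) (i j : Nat) (f : Int → Int) : List (List Int) :=
  g.modify i (fun row => row.modify j f)

-- ===== PORT A =====
def rotateA (target : List (List Int)) (d : Nat) : List (List Int) :=
  let n := target.length
  let tmp := List.replicate n (List.replicate n (0 : Int))
  if d = 1 then
    (List.range n).foldl (fun t x =>
      (List.range n).foldl (fun t y => set2 t y x (get2 target (n - 1 - x) y)) t) tmp
  else if d = 2 then
    (List.range n).foldl (fun t x =>
      (List.range n).foldl (fun t y => set2 t y x (get2 target (n - 1 - y) (n - 1 - x))) t) tmp
  else if d = 3 then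
    (List.range n).foldl (fun t x =>
      (List.range n).foldl (fun t y => set2 t y x (get2 target x (n - 1 - y))) t) tmp
  else
    (List.range n).foldl (fun t x =>
      (List.range n).foldl (fun t y => set2 t y x (get2 target y x)) t) tmp

def checkA (target : List (List Int)) : Bool :=
  let n := target.length / 3
  (List.range n).all (fun r => (List.range n).all (fun c => get2 target (n + r) (n + c) == 1))

def addKey (g nk : List (List Int)) (x y m : Nat) : List (List Int) :=
  (List.range m).foldl (fun g nx =>
    (List.range m).foldl (fun g ny => modify2 g (y + ny) (x + nx) (fun t => t + get2 nk ny nx)) g) g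

def subKey (g nk : List (List Int)) (x y m : Nat) : List (List Int) :=
  (List.range m).foldl (fun g nx =>
    (List.range m).foldl (fun g ny => modify2 g (y + ny) (x + nx) (fun t => t - get2 nk ny nx)) g) g

-- the x/y/degree triple loop of A, threading the mutated board state
def runA (key : List (List Int)) (m : Nat) :
    List (List Int) → List (Nat × Nat × Nat) → Bool
  | _, [] => false
  | g, (x, y, d) :: rest =>
    let nk := rotateA key d
    let g1 := addKey g nk x y m
    if checkA g1 then true else runA key m (subKey g1 nk x y m) rest

def solution (key : List (List Int)) (lock : List (List Int)) : Bool :=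
  let n := lock.length
  let m := key.length
  let base0 := List.replicate (3 * n) (List.replicate (3 * n) (0 : Int))
  let base := (List.range n).foldl (fun g x =>
    (List.range n).foldl (fun g y => set2 g (n + y) (n + x) (get2 lock y x)) g) base0
  let offs := (List.range (2 * n - 1)).map (· + 1)
  runA key m base
    (offs.flatMap (fun x => offs.flatMap (fun y => (List.range 4).map (fun d => (x, y, d)))))

-- ===== PORT B =====
def rotB (p : List (List Int)) : List (List Int) :=
  let m := p.length
  (List.range m).map (fun r => (List.range m).map (fun c => get2 p (m - 1 - c) r))

def fitB (lock k : List (List Int)) (n m x y : Nat) : Bool :=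
  (List.range n).all (fun r => (List.range n).all (fun c =>
    (get2 lock r c +
      (if y ≤ n + r ∧ n + r < y + m ∧ x ≤ n + c ∧ n + c < x + m then
        get2 k (n + r - y) (n + c - x) else 0)) == 1))

def solution_alt (key : List (List Int)) (lock : List (List Int)) : Bool :=
  let n := lock.length
  let m := key.length
  let r1 := rotB key
  let r2 := rotB r1
  let r3 := rotB r2
  let rots := [key, r1, r2, r3]
  let offs := (List.range (2 * n - 1)).map (· + 1)
  offs.any (fun y => offs.any (fun x => rots.any (fun k => fitB lock k n m x y)))

-- ===== PRECONDITION & SPEC =====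
-- Pre_ excludes the inputs on which one of the two Pythons raises IndexError: ragged key/lock
-- rows shorter than their matrix, or a key more than one larger than the lock (a shifted write
-- then leaves A's 3n board).  Two excluded corners where A still returns: with an oversized key
-- A may return True when an early placement fits before the out-of-range write (B also returns
-- True there), and with an empty lock A never touches the key, so it returns False even for a
-- ragged key on which B's up-front rotation raises.
def Pre_solution (key : List (List Int)) (lock : List (List Int)) : Prop :=
  (∀ row ∈ key, key.length ≤ row.length) ∧
    (lock.length = 0 ∨
      ((∀ row ∈ lock, lock.length ≤ row.length) ∧ key.length ≤ lock.length + 1))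
instance (key : List (List Int)) (lock : List (List Int)) : Decidable (Pre_solution key lock) := by
  unfold Pre_solution; infer_instance

def pvWitness_solution : List (List Int) × List (List Int) := ([[1]], [[0]])

def Spec_solution (key : List (List Int)) (lock : List (List Int)) (out : Bool) : Prop := out = solution_alt key lock
instance (key : List (List Int)) (lock : List (List Int)) (out : Bool) : Decidable (Spec_solution key lock out) := by unfold Spec_solution; infer_instance

-- ===== CLAIM (what is proved, stated in full; the proofs are below) =====
def Claim_equal_solution : Prop := ∀ (key : List (List Int)) (lock : List (List Int)), Dom_solution key lock → Pre_solution key lock → Spec_solution key lock (solution key lock)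

-- ===== LEMMAS AND PROOFS =====

-- row-level update lemmas
theorem getD_modify_row (row : List Int) (j b : Nat) (f : Int → Int) :
    (row.modify j f).getD b 0 = if j = b ∧ b < row.length then f (row.getD b 0) else row.getD b 0 := by
  simp only [List.getD_eq_getElem?_getD, List.getElem?_modify]
  by_cases h2 : b < row.length
  · by_cases h1 : j = b <;> simp_all [List.getElem?_eq_getElem]
  · rw [List.getElem?_eq_none (by omega)]; simp [h2]

theorem getD_set_row (row : List Int) (j b : Nat) (v : Int) :
    (row.set j v).getD b 0 = if j = b ∧ b < row.length then v else row.getD b 0 := by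
  simp only [List.getD_eq_getElem?_getD, List.getElem?_set]
  by_cases h2 : b < row.length
  · by_cases h1 : j = b <;> simp_all [List.getElem?_eq_getElem]
  · rw [List.getElem?_eq_none (by omega)]
    simp only [h2, and_false, if_false]
    split <;> [skip; rfl]
    split <;> [omega; rfl]

-- grid-level update lemmas
theorem getD_modify2 (g : List (List Int)) (i j a : Nat) (f : Int → Int) :
    (modify2 g i j f).getD a [] = if i = a then (g.getD a []).modify j f else g.getD a [] := by
  simp only [modify2, List.getD_eq_getElem?_getD, List.getElem?_modify]
  by_cases h1 : i = a
  · subst h1; cases h : g[i]? <;> simp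
  · simp [h1]

theorem getD_set2 (g : List (List Int)) (i j a : Nat) (v : Int) :
    (set2 g i j v).getD a [] = if i = a then (g.getD a []).set j v else g.getD a [] := by
  simp only [set2, List.getD_eq_getElem?_getD, List.getElem?_modify]
  by_cases h1 : i = a
  · subst h1; cases h : g[i]? <;> simp
  · simp [h1]

theorem len_modify2 (g : List (List Int)) (i j : Nat) (f : Int → Int) :
    (modify2 g i j f).length = g.length := List.length_modify ..

theorem len_set2 (g : List (List Int)) (i j : Nat) (v : Int) :
    (set2 g i j v).length = g.length := List.length_modify ..

theorem rowlen_modify2 (g : List (List Int)) (i j a : Nat) (f : Int → Int) :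
    ((modify2 g i j f).getD a []).length = (g.getD a []).length := by
  rw [getD_modify2]; split <;> simp

theorem rowlen_set2 (g : List (List Int)) (i j a : Nat) (v : Int) :
    ((set2 g i j v).getD a []).length = (g.getD a []).length := by
  rw [getD_set2]; split <;> simp

theorem get2_modify2 (g : List (List Int)) (i j a b : Nat) (f : Int → Int) :
    get2 (modify2 g i j f) a b =
      if i = a ∧ j = b ∧ b < (g.getD a []).length then f (get2 g a b) else get2 g a b := by
  unfold get2
  rw [getD_modify2]
  by_cases h1 : i = a
  · rw [if_pos h1, getD_modify_row]
    by_cases h2 : j = b ∧ b < (g.getD a []).length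
    · rw [if_pos h2, if_pos ⟨h1, h2⟩]
    · rw [if_neg h2, if_neg (by tauto)]
  · rw [if_neg h1, if_neg (by tauto)]

theorem get2_set2 (g : List (List Int)) (i j a b : Nat) (v : Int) :
    get2 (set2 g i j v) a b =
      if i = a ∧ j = b ∧ b < (g.getD a []).length then v else get2 g a b := by
  unfold get2
  rw [getD_set2]
  by_cases h1 : i = a
  · rw [if_pos h1, getD_set_row]
    by_cases h2 : j = b ∧ b < (g.getD a []).length
    · rw [if_pos h2, if_pos ⟨h1, h2⟩]
    · rw [if_neg h2, if_neg (by tauto)]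
  · rw [if_neg h1, if_neg (by tauto)]

-- a measure preserved by every fold step is preserved by the fold
theorem foldl_meas {α β γ : Type} (meas : α → γ) (step : α → β → α)
    (h : ∀ a e, meas (step a e) = meas a) :
    ∀ (ls : List β) (a : α), meas (ls.foldl step a) = meas a := by
  intro ls
  induction ls with
  | nil => intro a; rfl
  | cons e ls ih => intro a; simp only [List.foldl_cons, ih, h]

-- ==== characterisation of the add / sub loops (sum of touched contributions) ====

theorem add_inner (y c0 : Nat) (v : Nat → Int) :
    ∀ (ys : List Nat) (g : List (List Int)) (a b : Nat), b < (g.getD a []).length →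
      get2 (ys.foldl (fun g ny => modify2 g (y + ny) c0 (fun t => t + v ny)) g) a b
        = get2 g a b + ((ys.map (fun ny => if y + ny = a ∧ c0 = b then v ny else 0)).sum) := by
  intro ys
  induction ys with
  | nil => intro g a b hb; simp
  | cons ny ys ih =>
    intro g a b hb
    simp only [List.foldl_cons, List.map_cons, List.sum_cons]
    rw [ih _ a b (by rw [rowlen_modify2]; exact hb), get2_modify2]
    by_cases h : y + ny = a ∧ c0 = b
    · rw [if_pos ⟨h.1, h.2, h.2 ▸ hb⟩, if_pos h]; omega
    · rw [if_neg (by tauto), if_neg h]; omega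

theorem add_outer (x y : Nat) (w : Nat → Nat → Int) :
    ∀ (xs ys : List Nat) (g : List (List Int)) (a b : Nat), b < (g.getD a []).length →
      get2 (xs.foldl (fun g nx =>
          ys.foldl (fun g ny => modify2 g (y + ny) (x + nx) (fun t => t + w ny nx)) g) g) a b
        = get2 g a b +
          ((xs.map (fun nx =>
            ((ys.map (fun ny => if y + ny = a ∧ x + nx = b then w ny nx else 0)).sum))).sum) := by
  intro xs
  induction xs with
  | nil => intro ys g a b hb; simp
  | cons nx xs ih =>
    intro ys g a b hb
    simp only [List.foldl_cons, List.map_cons, List.sum_cons]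
    rw [ih ys _ a b (by
      rw [foldl_meas (fun g => ((g : List (List Int)).getD a []).length) _
        (fun g' ny => rowlen_modify2 g' _ _ a _) ys g]
      exact hb)]
    rw [add_inner y (x + nx) (fun ny => w ny nx) ys g a b hb]
    omega

theorem sum_ite_range (off t : Nat) (f : Nat → Int) :
    ∀ m : Nat, ((List.range m).map (fun i => if off + i = t then f i else 0)).sum
      = if off ≤ t ∧ t < off + m then f (t - off) else 0 := by
  intro m
  induction m with
  | zero => rw [if_neg (by omega)]; simp
  | succ m ih =>
    rw [List.range_succ, List.map_append, List.sum_append, ih]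
    simp only [List.map_cons, List.map_nil, List.sum_cons, List.sum_nil]
    by_cases h : off + m = t
    · rw [if_neg (by omega), if_pos h, if_pos (by omega)]
      have ht : t - off = m := by omega
      rw [ht]; omega
    · by_cases h2 : off ≤ t ∧ t < off + m
      · rw [if_pos h2, if_neg h, if_pos (by omega)]; omega
      · rw [if_neg h2, if_neg h, if_neg (by omega)]; omega

theorem add_collapse (x y m a b : Nat) (w : Nat → Nat → Int) :
    (((List.range m).map (fun nx =>
        (((List.range m).map (fun ny => if y + ny = a ∧ x + nx = b then w ny nx else 0)).sum))).sum)
      = if y ≤ a ∧ a < y + m ∧ x ≤ b ∧ b < x + m then w (a - y) (b - x) else 0 := by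
  have inner : ∀ nx : Nat,
      (((List.range m).map (fun ny => if y + ny = a ∧ x + nx = b then w ny nx else 0)).sum)
        = if x + nx = b then (if y ≤ a ∧ a < y + m then w (a - y) nx else 0) else 0 := by
    intro nx
    by_cases hx : x + nx = b
    · rw [if_pos hx, show (fun ny => if y + ny = a ∧ x + nx = b then w ny nx else 0)
        = fun ny => if y + ny = a then w ny nx else 0 from funext fun ny => by simp [hx],
        sum_ite_range y a (fun ny => w ny nx) m]
    · rw [if_neg hx, List.sum_eq_zero]
      intro z hz
      simp only [List.mem_map] at hz
      obtain ⟨i, _, hi⟩ := hz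
      rw [← hi, if_neg (by tauto)]
  simp only [inner]
  rw [sum_ite_range x b (fun nx => if y ≤ a ∧ a < y + m then w (a - y) nx else 0) m]
  split_ifs <;> first | rfl | omega

theorem add_get2 (g nk : List (List Int)) (x y m a b : Nat) (hb : b < (g.getD a []).length) :
    get2 (addKey g nk x y m) a b = get2 g a b +
      (if y ≤ a ∧ a < y + m ∧ x ≤ b ∧ b < x + m then get2 nk (a - y) (b - x) else 0) := by
  unfold addKey
  rw [add_outer x y (fun ny nx => get2 nk ny nx) (List.range m) (List.range m) g a b hb,
    add_collapse]

theorem sub_inner (y c0 : Nat) (v : Nat → Int) :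
    ∀ (ys : List Nat) (g : List (List Int)) (a b : Nat), b < (g.getD a []).length →
      get2 (ys.foldl (fun g ny => modify2 g (y + ny) c0 (fun t => t - v ny)) g) a b
        = get2 g a b - ((ys.map (fun ny => if y + ny = a ∧ c0 = b then v ny else 0)).sum) := by
  intro ys
  induction ys with
  | nil => intro g a b hb; simp
  | cons ny ys ih =>
    intro g a b hb
    simp only [List.foldl_cons, List.map_cons, List.sum_cons]
    rw [ih _ a b (by rw [rowlen_modify2]; exact hb), get2_modify2]
    by_cases h : y + ny = a ∧ c0 = b
    · rw [if_pos ⟨h.1, h.2, h.2 ▸ hb⟩, if_pos h]; omega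
    · rw [if_neg (by tauto), if_neg h]; omega

theorem sub_outer (x y : Nat) (w : Nat → Nat → Int) :
    ∀ (xs ys : List Nat) (g : List (List Int)) (a b : Nat), b < (g.getD a []).length →
      get2 (xs.foldl (fun g nx =>
          ys.foldl (fun g ny => modify2 g (y + ny) (x + nx) (fun t => t - w ny nx)) g) g) a b
        = get2 g a b -
          ((xs.map (fun nx =>
            ((ys.map (fun ny => if y + ny = a ∧ x + nx = b then w ny nx else 0)).sum))).sum) := by
  intro xs
  induction xs with
  | nil => intro ys g a b hb; simp
  | cons nx xs ih =>
    intro ys g a b hb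
    simp only [List.foldl_cons, List.map_cons, List.sum_cons]
    rw [ih ys _ a b (by
      rw [foldl_meas (fun g => ((g : List (List Int)).getD a []).length) _
        (fun g' ny => rowlen_modify2 g' _ _ a _) ys g]
      exact hb)]
    rw [sub_inner y (x + nx) (fun ny => w ny nx) ys g a b hb]
    omega

theorem sub_get2 (g nk : List (List Int)) (x y m a b : Nat) (hb : b < (g.getD a []).length) :
    get2 (subKey g nk x y m) a b = get2 g a b -
      (if y ≤ a ∧ a < y + m ∧ x ≤ b ∧ b < x + m then get2 nk (a - y) (b - x) else 0) := by
  unfold subKey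
  rw [sub_outer x y (fun ny nx => get2 nk ny nx) (List.range m) (List.range m) g a b hb,
    add_collapse]

theorem len_addKey (g nk : List (List Int)) (x y m : Nat) : (addKey g nk x y m).length = g.length := by
  unfold addKey
  exact foldl_meas List.length _ (fun g' nx =>
    foldl_meas List.length _ (fun g'' ny => len_modify2 g'' _ _ _) _ g') _ g
theorem len_subKey (g nk : List (List Int)) (x y m : Nat) : (subKey g nk x y m).length = g.length := by
  unfold subKey
  exact foldl_meas List.length _ (fun g' nx =>
    foldl_meas List.length _ (fun g'' ny => len_modify2 g'' _ _ _) _ g') _ g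
theorem rowlen_addKey (g nk : List (List Int)) (x y m a : Nat) :
    ((addKey g nk x y m).getD a []).length = (g.getD a []).length := by
  unfold addKey
  exact foldl_meas (fun g => ((g : List (List Int)).getD a []).length) _ (fun g' nx =>
    foldl_meas (fun g => ((g : List (List Int)).getD a []).length) _
      (fun g'' ny => rowlen_modify2 g'' _ _ a _) _ g') _ g
theorem rowlen_subKey (g nk : List (List Int)) (x y m a : Nat) :
    ((subKey g nk x y m).getD a []).length = (g.getD a []).length := by
  unfold subKey
  exact foldl_meas (fun g => ((g : List (List Int)).getD a []).length) _ (fun g' nx =>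
    foldl_meas (fun g => ((g : List (List Int)).getD a []).length) _
      (fun g'' ny => rowlen_modify2 g'' _ _ a _) _ g') _ g

-- extensionality for grids through get2
theorem grid_ext (t u : List (List Int)) (hlen : t.length = u.length)
    (hrow : ∀ a, (t.getD a []).length = (u.getD a []).length)
    (hval : ∀ a b, b < (t.getD a []).length → get2 t a b = get2 u a b) : t = u := by
  apply List.ext_getElem?
  intro i
  by_cases hi : i < t.length
  · have hi' : i < u.length := by omega
    rw [List.getElem?_eq_getElem hi, List.getElem?_eq_getElem hi']
    have ht : t.getD i [] = t[i] := List.getD_eq_getElem t [] hi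
    have hu : u.getD i [] = u[i] := List.getD_eq_getElem u [] hi'
    have hrl : t[i].length = u[i].length := by rw [← ht, ← hu]; exact hrow i
    congr 1
    apply List.ext_getElem hrl
    intro j hj1 hj2
    have hv := hval i j (by rw [ht]; exact hj1)
    unfold get2 at hv
    rwa [ht, hu, List.getD_eq_getElem _ _ hj1, List.getD_eq_getElem _ _ hj2] at hv
  · rw [List.getElem?_eq_none (by omega), List.getElem?_eq_none (by omega)]

theorem subKey_addKey (g nk : List (List Int)) (x y m : Nat) :
    subKey (addKey g nk x y m) nk x y m = g := by
  apply grid_ext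
  · rw [len_subKey, len_addKey]
  · intro a; rw [rowlen_subKey, rowlen_addKey]
  · intro a b hb
    rw [rowlen_subKey, rowlen_addKey] at hb
    rw [sub_get2 _ _ _ _ _ _ _ (by rwa [rowlen_addKey]), add_get2 _ _ _ _ _ _ _ hb]
    omega

theorem runA_any (key : List (List Int)) (m : Nat) :
    ∀ (ts : List (Nat × Nat × Nat)) (g : List (List Int)),
      runA key m g ts = ts.any (fun t => checkA (addKey g (rotateA key t.2.2) t.1 t.2.1 m)) := by
  intro ts
  induction ts with
  | nil => intro g; rfl
  | cons t rest ih =>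
    intro g
    obtain ⟨xx, yy, dd⟩ := t
    simp only [runA, List.any_cons]
    by_cases h : checkA (addKey g (rotateA key dd) xx yy m)
    · simp [h]
    · rw [if_neg h, ih, subKey_addKey]
      simp [h]

-- ==== characterisation of the set loops (build of base board / rotations) ====

theorem set_inner (y0 c0 : Nat) (w : Nat → Int) :
    ∀ (ys : List Nat) (g : List (List Int)) (a b : Nat), b < (g.getD a []).length →
      get2 (ys.foldl (fun g ny => set2 g (y0 + ny) c0 (w ny)) g) a b
        = if b = c0 ∧ (∃ ny ∈ ys, a = y0 + ny) then w (a - y0) else get2 g a b := by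
  intro ys
  induction ys with
  | nil => intro g a b hb; simp
  | cons ny ys ih =>
    intro g a b hb
    simp only [List.foldl_cons]
    rw [ih _ a b (by rw [rowlen_set2]; exact hb)]
    have hstep := get2_set2 g (y0 + ny) c0 a b (w ny)
    by_cases hcell : y0 + ny = a ∧ c0 = b
    · rw [if_pos ⟨hcell.1, hcell.2, hb⟩] at hstep
      have ha : a - y0 = ny := by omega
      by_cases hrest : b = c0 ∧ ∃ n' ∈ ys, a = y0 + n'
      · rw [if_pos hrest, if_pos ⟨hrest.1, ny, List.mem_cons_self, hcell.1.symm⟩]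
      · rw [if_neg hrest, hstep, if_pos ⟨hcell.2.symm, ny, List.mem_cons_self, hcell.1.symm⟩, ha]
    · rw [if_neg (fun hc => hcell ⟨hc.1, hc.2.1⟩)] at hstep
      rw [hstep]
      by_cases hrest : b = c0 ∧ ∃ n' ∈ ys, a = y0 + n'
      · obtain ⟨h1, n', hn, h2⟩ := hrest
        rw [if_pos ⟨h1, n', hn, h2⟩, if_pos ⟨h1, n', List.mem_cons_of_mem _ hn, h2⟩]
      · rw [if_neg hrest, if_neg (by
          rintro ⟨h1, n', hn, h2⟩
          rcases List.mem_cons.mp hn with h | h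
          · exact hcell ⟨by omega, h1.symm⟩
          · exact hrest ⟨h1, n', h, h2⟩)]

theorem set_outer (x0 y0 : Nat) (f : Nat → Nat → Int) :
    ∀ (xs ys : List Nat) (g : List (List Int)) (a b : Nat), b < (g.getD a []).length →
      get2 (xs.foldl (fun g nx =>
          ys.foldl (fun g ny => set2 g (y0 + ny) (x0 + nx) (f nx ny)) g) g) a b
        = if (∃ nx ∈ xs, b = x0 + nx) ∧ (∃ ny ∈ ys, a = y0 + ny) then f (b - x0) (a - y0)
          else get2 g a b := by
  intro xs
  induction xs with
  | nil => intro ys g a b hb; simp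
  | cons nx xs ih =>
    intro ys g a b hb
    simp only [List.foldl_cons]
    rw [ih ys _ a b (by
      rw [foldl_meas (fun g => ((g : List (List Int)).getD a []).length) _
        (fun g' ny => rowlen_set2 g' _ _ a _) ys g]
      exact hb)]
    have hstep := set_inner y0 (x0 + nx) (fun ny => f nx ny) ys g a b hb
    by_cases hcol : b = x0 + nx
    · have hbx : b - x0 = nx := by omega
      by_cases hy : ∃ ny ∈ ys, a = y0 + ny
      · rw [if_pos ⟨hcol, hy⟩] at hstep
        by_cases hxs : ∃ nx' ∈ xs, b = x0 + nx'
        · rw [if_pos ⟨hxs, hy⟩, if_pos ⟨⟨nx, List.mem_cons_self, hcol⟩, hy⟩]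
        · rw [if_neg (show ¬((∃ nx' ∈ xs, b = x0 + nx') ∧ ∃ ny ∈ ys, a = y0 + ny) from
              fun hc => hxs hc.1), hstep,
            if_pos ⟨⟨nx, List.mem_cons_self, hcol⟩, hy⟩, hbx]
      · rw [if_neg (show ¬(b = x0 + nx ∧ ∃ ny ∈ ys, a = y0 + ny) from fun hc => hy hc.2)] at hstep
        rw [hstep,
          if_neg (show ¬((∃ nx' ∈ xs, b = x0 + nx') ∧ ∃ ny ∈ ys, a = y0 + ny) from
            fun hc => hy hc.2),
          if_neg (show ¬((∃ nx' ∈ nx :: xs, b = x0 + nx') ∧ ∃ ny ∈ ys, a = y0 + ny) from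
            fun hc => hy hc.2)]
    · rw [if_neg (show ¬(b = x0 + nx ∧ ∃ ny ∈ ys, a = y0 + ny) from fun hc => hcol hc.1)] at hstep
      rw [hstep]
      by_cases hrest : (∃ nx' ∈ xs, b = x0 + nx') ∧ ∃ ny ∈ ys, a = y0 + ny
      · obtain ⟨⟨n', hn, h2⟩, hy2⟩ := hrest
        rw [if_pos ⟨⟨n', hn, h2⟩, hy2⟩, if_pos ⟨⟨n', List.mem_cons_of_mem _ hn, h2⟩, hy2⟩]
      · rw [if_neg hrest, if_neg (by
          rintro ⟨⟨n', hn, h2⟩, hy2⟩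
          rcases List.mem_cons.mp hn with h | h
          · exact hcol (by omega)
          · exact hrest ⟨⟨n', h, h2⟩, hy2⟩)]

theorem all_congr_mem {α : Type} (l : List α) (p q : α → Bool) (h : ∀ x ∈ l, p x = q x) :
    l.all p = l.all q := by
  induction l with
  | nil => rfl
  | cons a l ih => simp_all

theorem any_swap {α β : Type} (l1 : List α) (l2 : List β) (p : α → β → Bool) :
    (l1.any fun x => l2.any fun y => p x y) = l2.any fun y => l1.any fun x => p x y := by
  rw [Bool.eq_iff_iff]
  simp only [List.any_eq_true]
  tauto

theorem getD_replicate_row (n k : Nat) (h : k < n) :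
    (List.replicate n (List.replicate n (0 : Int))).getD k [] = List.replicate n (0 : Int) := by
  simp [List.getD_eq_getElem?_getD, List.getElem?_replicate, h]

-- pointwise value of the square build loops (rotate / else branch shape)
theorem build_get2 (f : Nat → Nat → Int) (n a b : Nat) (ha : a < n) (hb : b < n) :
    get2 ((List.range n).foldl (fun t x =>
        (List.range n).foldl (fun t y => set2 t y x (f x y)) t)
      (List.replicate n (List.replicate n (0 : Int)))) a b = f b a := by
  have h := set_outer 0 0 f (List.range n) (List.range n)
    (List.replicate n (List.replicate n (0 : Int))) a b
    (by rw [getD_replicate_row n a ha]; simp [hb])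
  simp only [Nat.zero_add] at h
  rw [h, if_pos ⟨⟨b, List.mem_range.mpr hb, rfl⟩, ⟨a, List.mem_range.mpr ha, rfl⟩⟩]
  simp

theorem rotA0_get2 (key : List (List Int)) (a b : Nat)
    (ha : a < key.length) (hb : b < key.length) :
    get2 (rotateA key 0) a b = get2 key a b := by
  unfold rotateA
  norm_num
  exact build_get2 (fun x y => get2 key y x) key.length a b ha hb

theorem rotA1_get2 (key : List (List Int)) (a b : Nat)
    (ha : a < key.length) (hb : b < key.length) :
    get2 (rotateA key 1) a b = get2 key (key.length - 1 - b) a := by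
  unfold rotateA
  norm_num
  exact build_get2 (fun x y => get2 key (key.length - 1 - x) y) key.length a b ha hb

theorem rotA2_get2 (key : List (List Int)) (a b : Nat)
    (ha : a < key.length) (hb : b < key.length) :
    get2 (rotateA key 2) a b = get2 key (key.length - 1 - a) (key.length - 1 - b) := by
  unfold rotateA
  norm_num
  exact build_get2 (fun x y => get2 key (key.length - 1 - y) (key.length - 1 - x))
    key.length a b ha hb

theorem rotA3_get2 (key : List (List Int)) (a b : Nat)
    (ha : a < key.length) (hb : b < key.length) :
    get2 (rotateA key 3) a b = get2 key b (key.length - 1 - a) := by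
  unfold rotateA
  norm_num
  exact build_get2 (fun x y => get2 key x (key.length - 1 - y)) key.length a b ha hb

theorem rotB_len (p : List (List Int)) : (rotB p).length = p.length := by
  simp [rotB]

theorem rotB_get2 (p : List (List Int)) (a b : Nat) (ha : a < p.length) (hb : b < p.length) :
    get2 (rotB p) a b = get2 p (p.length - 1 - b) a := by
  simp [rotB, get2, List.getD_eq_getElem?_getD, List.getElem?_map, List.getElem?_range, ha, hb]

theorem base_len (lock : List (List Int)) (n : Nat) :
    ((List.range n).foldl (fun g x =>
        (List.range n).foldl (fun g y => set2 g (n + y) (n + x) (get2 lock y x)) g)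
      (List.replicate (3 * n) (List.replicate (3 * n) (0 : Int)))).length = 3 * n := by
  rw [foldl_meas List.length _ (fun g' nx =>
    foldl_meas List.length _ (fun g'' ny => len_set2 g'' _ _ _) _ g') _ _]
  simp

theorem base_rowlen (lock : List (List Int)) (n a : Nat) (ha : a < 3 * n) :
    (((List.range n).foldl (fun g x =>
        (List.range n).foldl (fun g y => set2 g (n + y) (n + x) (get2 lock y x)) g)
      (List.replicate (3 * n) (List.replicate (3 * n) (0 : Int)))).getD a []).length = 3 * n := by
  rw [foldl_meas (fun g => ((g : List (List Int)).getD a []).length) _ (fun g' nx =>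
    foldl_meas (fun g => ((g : List (List Int)).getD a []).length) _
      (fun g'' ny => rowlen_set2 g'' _ _ a _) _ g') _ _]
  rw [getD_replicate_row _ _ ha]
  simp

theorem base_get2 (lock : List (List Int)) (n r c : Nat) (hr : r < n) (hc : c < n) :
    get2 ((List.range n).foldl (fun g x =>
        (List.range n).foldl (fun g y => set2 g (n + y) (n + x) (get2 lock y x)) g)
      (List.replicate (3 * n) (List.replicate (3 * n) (0 : Int)))) (n + r) (n + c)
      = get2 lock r c := by
  have h := set_outer n n (fun nx ny => get2 lock ny nx) (List.range n) (List.range n)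
    (List.replicate (3 * n) (List.replicate (3 * n) (0 : Int))) (n + r) (n + c)
    (by rw [getD_replicate_row (3 * n) (n + r) (by omega)]; simp; omega)
  rw [h, if_pos ⟨⟨c, List.mem_range.mpr hc, rfl⟩, ⟨r, List.mem_range.mpr hr, rfl⟩⟩]
  have e1 : n + r - n = r := by omega
  have e2 : n + c - n = c := by omega
  rw [e1, e2]

theorem place_eq (lock key nk k : List (List Int)) (x y : Nat)
    (hk : ∀ a b, a < key.length → b < key.length → get2 nk a b = get2 k a b) :
    checkA (addKey ((List.range lock.length).foldl (fun g x =>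
        (List.range lock.length).foldl
          (fun g y => set2 g (lock.length + y) (lock.length + x) (get2 lock y x)) g)
      (List.replicate (3 * lock.length) (List.replicate (3 * lock.length) (0 : Int))))
      nk x y key.length)
      = fitB lock k lock.length key.length x y := by
  unfold checkA fitB
  rw [len_addKey, base_len, Nat.mul_div_cancel_left _ (by norm_num)]
  apply all_congr_mem
  intro r hr
  apply all_congr_mem
  intro c hc
  rw [List.mem_range] at hr hc
  rw [add_get2 _ _ _ _ _ _ _ (by rw [base_rowlen _ _ _ (by omega)]; omega)]
  rw [base_get2 lock lock.length r c hr hc]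
  by_cases hcond : y ≤ lock.length + r ∧ lock.length + r < y + key.length ∧
      x ≤ lock.length + c ∧ lock.length + c < x + key.length
  · rw [if_pos hcond, if_pos hcond, hk _ _ (by omega) (by omega)]
  · rw [if_neg hcond, if_neg hcond]

-- ===== VERDICT (by name: the statement is the Claim_ definition above) =====
theorem solution_spec : Claim_equal_solution := by
  unfold Claim_equal_solution Spec_solution
  intro key lock _ _
  simp only [solution, solution_alt]
  rw [runA_any]
  simp only [List.any_flatMap, List.any_map, Function.comp_def]
  have hr1 : ∀ a b : Nat, a < key.length → b < key.length →
      get2 (rotateA key 1) a b = get2 (rotB key) a b := by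
    intro a b ha hb
    rw [rotA1_get2 key a b ha hb, rotB_get2 key a b ha hb]
  have hlen1 : (rotB key).length = key.length := rotB_len key
  have hlen2 : (rotB (rotB key)).length = key.length := by rw [rotB_len, hlen1]
  have hr2 : ∀ a b : Nat, a < key.length → b < key.length →
      get2 (rotateA key 2) a b = get2 (rotB (rotB key)) a b := by
    intro a b ha hb
    rw [rotA2_get2 key a b ha hb,
      rotB_get2 (rotB key) a b (by rw [hlen1]; omega) (by rw [hlen1]; omega), hlen1,
      rotB_get2 key (key.length - 1 - b) a (by omega) ha]
  have hr3 : ∀ a b : Nat, a < key.length → b < key.length →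
      get2 (rotateA key 3) a b = get2 (rotB (rotB (rotB key))) a b := by
    intro a b ha hb
    rw [rotA3_get2 key a b ha hb,
      rotB_get2 (rotB (rotB key)) a b (by rw [hlen2]; omega) (by rw [hlen2]; omega), hlen2,
      rotB_get2 (rotB key) (key.length - 1 - b) a (by rw [hlen1]; omega) (by rw [hlen1]; omega),
      hlen1,
      rotB_get2 key (key.length - 1 - a) (key.length - 1 - b) (by omega) (by omega)]
    have e : key.length - 1 - (key.length - 1 - b) = b := by omega
    rw [e]
  have h4 : ∀ xx yy : Nat,
      (List.range 4).any (fun d => checkA (addKey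
        ((List.range lock.length).foldl (fun g x =>
          (List.range lock.length).foldl
            (fun g y => set2 g (lock.length + y) (lock.length + x) (get2 lock y x)) g)
          (List.replicate (3 * lock.length) (List.replicate (3 * lock.length) (0 : Int))))
        (rotateA key d) xx yy key.length))
      = ([key, rotB key, rotB (rotB key), rotB (rotB (rotB key))].any
          (fun k => fitB lock k lock.length key.length xx yy)) := by
    intro xx yy
    rw [show List.range 4 = [0, 1, 2, 3] from rfl]
    simp only [List.any_cons, List.any_nil]
    rw [place_eq lock key _ key xx yy (fun a b ha hb => rotA0_get2 key a b ha hb),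
      place_eq lock key _ (rotB key) xx yy hr1,
      place_eq lock key _ (rotB (rotB key)) xx yy hr2,
      place_eq lock key _ (rotB (rotB (rotB key))) xx yy hr3]
  simp only [h4]
  rw [any_swap]
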